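-- pv_equiv track=rewrite | github.com/jakuberan/AoC-2022 | day_10/main.py | get_signal_strengths
-- ===== SOURCE A (Python) =====
-- def move_and_record(time: int, times: list, out: dict, x: int):
--     """
--     Move time and record signal if this time is interesting
--     """
--     time += 1
--     if time in times:
--         out[time] = x
--
--     return time, out
--
-- def get_signal_strengths(program: list, times: list):
--     """
--     Signal strength at pre-defined times
--     """
--     x = 1
--     time = 0
--     out = {}
--     for p in program:
--         time, out = move_and_record(time, times, out, x)
--         if p[0] == 'a':
--             time, out = move_and_record(time, times, out, x)
--             x += p[1]
--     return out
-- ===== SOURCE B (Python) =====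
-- def get_signal_strengths(program: list, times: list):
--     """
--     Signal strength at pre-defined times.
--     Two-phase rewrite: build a per-cycle history of x, then select the
--     requested cycles from it in one pass over enumerate(history).
--     """
--     x = 1
--     history = []
--     for op, v in program:
--         history.append(x)
--         if op == 'a':
--             history.append(x)
--             x += v
--     wanted = set(times)
--     return {c: xv for c, xv in enumerate(history, start=1) if c in wanted}
-- ===== Notes on version B (the rewrite author's own statement) =====
-- stated objective: faster
-- what changed: Replaces the inline move_and_record accumulator (ticking a clock and testing list membership in times at every cycle) with a two-phase design: one pass builds a per-cycle history of x, then a single pass over enumerate(history) with a precomputed set of times selects the requested cycles.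
import Mathlib
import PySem

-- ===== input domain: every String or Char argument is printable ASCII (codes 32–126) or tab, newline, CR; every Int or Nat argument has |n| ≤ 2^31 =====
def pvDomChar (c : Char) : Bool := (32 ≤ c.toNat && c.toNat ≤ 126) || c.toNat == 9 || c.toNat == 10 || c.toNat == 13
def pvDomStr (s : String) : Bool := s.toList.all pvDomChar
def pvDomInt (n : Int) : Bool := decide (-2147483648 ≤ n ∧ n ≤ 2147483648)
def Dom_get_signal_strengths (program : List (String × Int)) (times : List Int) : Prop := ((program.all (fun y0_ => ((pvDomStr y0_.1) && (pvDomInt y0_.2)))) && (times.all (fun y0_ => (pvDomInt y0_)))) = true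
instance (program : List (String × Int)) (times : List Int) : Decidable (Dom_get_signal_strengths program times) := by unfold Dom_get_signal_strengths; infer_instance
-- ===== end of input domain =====

-- B builds the cycle-by-cycle history first, then selects the requested times from it;
-- A records on the fly via move_and_record. Return values agree on all inputs.

-- ===== PORT A =====
def move_and_record (time : Int) (times : List Int) (out : PySem.Dict Int Int) (x : Int) :
    Int × PySem.Dict Int Int :=
  let time := time + 1
  let out := if time ∈ times then out.insert time x else out
  (time, out)

-- the 'for p in program' loop of A, as structural recursion over program
def aLoop (times : List Int) : List (String × Int) → Int → Int → PySem.Dict Int Int → PySem.Dict Int Int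
  | [], _, _, out => out
  | p :: ps, x, time, out =>
    let r1 := move_and_record time times out x
    if p.1 == "a" then
      let r2 := move_and_record r1.1 times r1.2 x
      aLoop times ps (x + p.2) r2.1 r2.2
    else
      aLoop times ps x r1.1 r1.2

def get_signal_strengths (program : List (String × Int)) (times : List Int) : List (Int × Int) :=
  (aLoop times program 1 0 PySem.Dict.empty).items

-- ===== PORT B =====
-- phase 1 of B: the history-building loop (state: current x, history so far)
def bHistLoop : List (String × Int) → Int × List Int → Int × List Int
  | [], s => s
  | p :: ps, s =>
    bHistLoop ps (if p.1 == "a" then (s.1 + p.2, s.2 ++ [s.1, s.1]) else (s.1, s.2 ++ [s.1]))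

-- phase 2 of B: the dict comprehension over enumerate(history, 1)
def bSelLoop (wanted : PySem.Set Int) : List (Int × Int) → PySem.Dict Int Int → PySem.Dict Int Int
  | [], out => out
  | cv :: rest, out =>
    bSelLoop wanted rest (if PySem.Set.contains wanted cv.1 then out.insert cv.1 cv.2 else out)

def get_signal_strengths_alt (program : List (String × Int)) (times : List Int) : List (Int × Int) :=
  let hx := bHistLoop program (1, [])
  let wanted := PySem.Set.ofList times
  (bSelLoop wanted (PySem.List.enumerate hx.2 1) PySem.Dict.empty).items

-- ===== PRECONDITION & SPEC =====
def Spec_get_signal_strengths (program : List (String × Int)) (times : List Int) (out : List (Int × Int)) : Prop := out = get_signal_strengths_alt program times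
instance (program : List (String × Int)) (times : List Int) (out : List (Int × Int)) : Decidable (Spec_get_signal_strengths program times out) := by unfold Spec_get_signal_strengths; infer_instance

-- ===== CLAIM (what is proved, stated in full; the proofs are below) =====
def Claim_equal_get_signal_strengths : Prop := ∀ (program : List (String × Int)) (times : List Int), Dom_get_signal_strengths program times → Spec_get_signal_strengths program times (get_signal_strengths program times)

-- ===== LEMMAS AND PROOFS =====

-- the x-values of the successive cycles produced by the rest of the program, starting from x
def pvHist : List (String × Int) → Int → List Int
  | [], _ => []
  | p :: ps, x => if p.1 == "a" then x :: x :: pvHist ps (x + p.2) else x :: pvHist ps x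

-- recording walk over a history starting at cycle c (common shape of both loops)
def pvSel (times : List Int) : List Int → Int → PySem.Dict Int Int → PySem.Dict Int Int
  | [], _, out => out
  | v :: h, c, out => pvSel times h (c + 1) (if c ∈ times then out.insert c v else out)

theorem bHistLoop_snd (ps : List (String × Int)) : ∀ (x : Int) (h : List Int),
    (bHistLoop ps (x, h)).2 = h ++ pvHist ps x := by
  induction ps with
  | nil => intro x h; simp [bHistLoop, pvHist]
  | cons p ps ih =>
    intro x h
    by_cases hc : (p.1 == "a") = true <;> simp [bHistLoop, pvHist, hc, ih]

theorem bSelLoop_eq_pvSel (times : List Int) (h : List Int) :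
    ∀ (c : Int) (out : PySem.Dict Int Int),
    bSelLoop (PySem.Set.ofList times) (PySem.List.enumerate h c) out = pvSel times h c out := by
  induction h with
  | nil => intro c out; simp [PySem.List.enumerate_nil, bSelLoop, pvSel]
  | cons v h ih =>
    intro c out
    rw [PySem.List.enumerate_cons]
    simp only [bSelLoop, pvSel]
    rw [ih]
    congr 1
    by_cases hm : c ∈ times <;>
      simp [hm, PySem.Set.contains, PySem.Set.mem_ofList]

theorem aLoop_eq_pvSel (times : List Int) (ps : List (String × Int)) :
    ∀ (x time : Int) (out : PySem.Dict Int Int),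
    aLoop times ps x time out = pvSel times (pvHist ps x) (time + 1) out := by
  induction ps with
  | nil => intro x time out; simp [aLoop, pvHist, pvSel]
  | cons p ps ih =>
    intro x time out
    by_cases hc : (p.1 == "a") = true <;>
      simp [aLoop, move_and_record, hc, pvHist, pvSel, ih]

-- ===== VERDICT (by name: the statement is the Claim_ definition above) =====
theorem get_signal_strengths_spec : Claim_equal_get_signal_strengths := by
  intro program times _
  unfold Spec_get_signal_strengths get_signal_strengths get_signal_strengths_alt
  simp only [aLoop_eq_pvSel, bHistLoop_snd, bSelLoop_eq_pvSel, List.nil_append, zero_add]
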